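-- pv_equiv track=rewrite | github.com/nqh-tq-32052503/OverlappedSpeechDetection | model.py | find_equal_runs
-- ===== SOURCE A (Python) =====
-- def find_equal_runs(nums):
--     """
--     Find consecutive runs of equal integers in a list.
--
--     Args:
--         nums (list[int]): input list (can be empty).
--
--     Returns:
--         list[dict]: each dict has keys:
--             - "start": start index (inclusive, 0-based)
--             - "end":   end index (inclusive)
--             - "value": the integer value of the run
--
--     Example:
--         >>> find_equal_runs([2,2,2,2,3,3,3,4,2,2,2])
--         [
--         {'start': 0, 'end': 3, 'value': 2},
--         {'start': 4, 'end': 6, 'value': 3},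
--         {'start': 7, 'end': 7, 'value': 4},
--         {'start': 8, 'end': 10, 'value': 2},
--         ]
--     """
--     runs = []
--     if not nums:
--         return runs
--
--     start = 0
--     curr = nums[0]
--
--     for i in range(1, len(nums)):
--         if nums[i] != curr:
--             runs.append({"start": start, "end": i - 1, "value": curr})
--             start = i
--             curr = nums[i]
--
--     # append final run
--     runs.append({"start": start, "end": len(nums) - 1, "value": curr})
--     return runs
-- ===== SOURCE B (Python) =====
-- def find_equal_runs(nums):
--     """Two staged passes: first collect the boundary indices where the value
--     changes (plus the endpoints), then zip adjacent boundaries into run dicts."""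
--     if not nums:
--         return []
--     n = len(nums)
--     bounds = [0] + [i for i in range(1, n) if nums[i] != nums[i - 1]] + [n]
--     return [{"start": s, "end": e - 1, "value": nums[s]}
--             for s, e in zip(bounds, bounds[1:])]
-- ===== Notes on version B (the rewrite author's own statement) =====
-- stated objective: alternative
-- what changed: Replaces A's single stateful pass (carrying the pending run's start and value and flushing the final run after the loop) by a stateless two-pass boundary method: pass one builds the list of indices where the value changes plus the endpoints, pass two zips adjacent boundaries into the run dicts, reading each run's value back from the list.
import Mathlib
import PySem

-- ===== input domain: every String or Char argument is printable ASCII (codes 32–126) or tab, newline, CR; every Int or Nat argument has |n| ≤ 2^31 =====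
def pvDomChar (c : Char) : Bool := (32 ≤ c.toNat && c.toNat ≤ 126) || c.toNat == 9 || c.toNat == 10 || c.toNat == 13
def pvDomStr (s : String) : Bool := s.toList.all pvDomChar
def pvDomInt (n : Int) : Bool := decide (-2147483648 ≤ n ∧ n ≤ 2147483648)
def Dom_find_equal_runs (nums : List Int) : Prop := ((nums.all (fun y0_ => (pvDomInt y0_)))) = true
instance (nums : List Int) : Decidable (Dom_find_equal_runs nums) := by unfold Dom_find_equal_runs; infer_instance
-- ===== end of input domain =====

-- B replaces A's single stateful pass (pending run + final flush) by a two-pass boundary method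
-- (collect change indices plus endpoints, then zip adjacent boundaries into runs): same cost, different algorithm shape.

-- ===== PORT A =====
-- literal port of A: one pass over range(1, n) carrying (runs, start, curr), flushing the final run after the loop;
-- nums[i] is ported as pyGetD nums i 0, exact here because every index A reads is in range
def find_equal_runs (nums : List Int) : List (List (String × Int)) :=
  if nums = [] then []
  else
    let st := (PySem.List.pyRange 1 (nums.length : Int) 1).foldl
      (fun (st : List (List (String × Int)) × Int × Int) i =>
        if PySem.List.pyGetD nums i 0 ≠ st.2.2 then
          (st.1 ++ [[("start", st.2.1), ("end", i - 1), ("value", st.2.2)]], i, PySem.List.pyGetD nums i 0)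
        else st)
      (([] : List (List (String × Int))), (0 : Int), PySem.List.pyGetD nums 0 0)
    st.1 ++ [[("start", st.2.1), ("end", (nums.length : Int) - 1), ("value", st.2.2)]]

-- ===== PORT B =====
-- literal port of Source B: bounds = [0] + [i in range(1,n) with nums[i] != nums[i-1]] + [n],
-- then map over zip(bounds, bounds[1:]); nums[i] ported as pyGetD (all indices read are in range)
def find_equal_runs_alt (nums : List Int) : List (List (String × Int)) :=
  if nums = [] then []
  else
    let n : Int := (nums.length : Int)
    let bounds : List Int :=
      [0] ++ ((PySem.List.pyRange 1 n 1).filter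
        (fun i => PySem.List.pyGetD nums i 0 != PySem.List.pyGetD nums (i - 1) 0)) ++ [n]
    (bounds.zip bounds.tail).map (fun p =>
      [("start", p.1), ("end", p.2 - 1), ("value", PySem.List.pyGetD nums p.1 0)])

-- ===== PRECONDITION & SPEC =====
def Spec_find_equal_runs (nums : List Int) (out : List (List (String × Int))) : Prop := out = find_equal_runs_alt nums
instance (nums : List Int) (out : List (List (String × Int))) : Decidable (Spec_find_equal_runs nums out) := by unfold Spec_find_equal_runs; infer_instance

-- ===== CLAIM (what is proved, stated in full; the proofs are below) =====
def Claim_equal_find_equal_runs : Prop := ∀ (nums : List Int), Dom_find_equal_runs nums → Spec_find_equal_runs nums (find_equal_runs nums)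

-- ===== LEMMAS AND PROOFS =====

theorem pyGetD_nat (nums : List Int) (j : ℕ) (h : j < nums.length) :
    PySem.List.pyGetD nums (j : Int) 0 = nums[j] := by
  simp [PySem.List.pyGetD_natCast, List.getD_eq_getElem?_getD, List.getElem?_eq_getElem h]

-- element-at-a-time recursive characterisation common to both ports
def pvSpecFrom (s c i : Int) : List Int → List (List (String × Int))
  | [] => [[("start", s), ("end", i - 1), ("value", c)]]
  | x :: t =>
    if x ≠ c then [("start", s), ("end", i - 1), ("value", c)] :: pvSpecFrom i x (i + 1) t
    else pvSpecFrom s c (i + 1) t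

-- A's fold-plus-flush computes pvSpecFrom
theorem key_foldA (nums : List Int) :
    ∀ (l : List Int) (i : ℕ), nums.drop i = l → i ≤ nums.length →
    ∀ (runs : List (List (String × Int))) (s c : Int),
    (let st := (PySem.List.pyRange (i : Int) (nums.length : Int) 1).foldl
      (fun (st : List (List (String × Int)) × Int × Int) j =>
        if PySem.List.pyGetD nums j 0 ≠ st.2.2 then
          (st.1 ++ [[("start", st.2.1), ("end", j - 1), ("value", st.2.2)]], j, PySem.List.pyGetD nums j 0)
        else st)
      (runs, s, c)
    st.1 ++ [[("start", st.2.1), ("end", (nums.length : Int) - 1), ("value", st.2.2)]])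
    = runs ++ pvSpecFrom s c (i : Int) l := by
  intro l
  induction l with
  | nil =>
    intro i hd hle runs s c
    have hlen : nums.length ≤ i := List.drop_eq_nil_iff.mp hd
    have hi : i = nums.length := by omega
    rw [PySem.List.pyRange_one_eq_nil (by exact_mod_cast hi.ge)]
    simp [pvSpecFrom, hi]
  | cons x t ih =>
    intro i hd hle runs s c
    have hj : i < nums.length := by
      by_contra hc
      rw [List.drop_eq_nil_iff.mpr (by omega)] at hd; exact absurd hd (by simp)
    have hcc := (List.drop_eq_getElem_cons (l := nums) hj).symm.trans hd
    obtain ⟨hx, ht⟩ := List.cons_eq_cons.mp hcc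
    have hget : PySem.List.pyGetD nums (i : Int) 0 = x := by rw [pyGetD_nat nums i hj, hx]
    rw [PySem.List.pyRange_one_cons (by exact_mod_cast hj)]
    simp only [List.foldl_cons, hget]
    have hrec := ih (i + 1) ht (by omega)
    push_cast at hrec
    by_cases hv : x = c
    · rw [if_neg (by simp [hv])]
      rw [hrec, pvSpecFrom, if_neg (by simp [hv])]
    · rw [if_pos (by simpa using hv)]
      rw [hrec, pvSpecFrom, if_pos (by simpa using hv)]
      simp

-- recursion pairing adjacent boundaries, the shape map-over-zip unfolds to
def pvPairs (nums : List Int) : List Int → List (List (String × Int))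
  | s :: e :: rest =>
      [("start", s), ("end", e - 1), ("value", PySem.List.pyGetD nums s 0)] :: pvPairs nums (e :: rest)
  | _ => []

theorem pvPairs_cons_cons (nums : List Int) (s e : Int) (rest : List Int) :
    pvPairs nums (s :: e :: rest)
      = [("start", s), ("end", e - 1), ("value", PySem.List.pyGetD nums s 0)] :: pvPairs nums (e :: rest) := rfl

theorem zip_map_eq_pairs (nums : List Int) (b : List Int) :
    (b.zip b.tail).map (fun p : Int × Int =>
      [("start", p.1), ("end", p.2 - 1), ("value", PySem.List.pyGetD nums p.1 0)]) = pvPairs nums b := by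
  induction b with
  | nil => simp [pvPairs]
  | cons s b ih =>
    cases b with
    | nil => simp [pvPairs]
    | cons e rest =>
      simp only [List.tail_cons, List.zip_cons_cons, List.map_cons, pvPairs]
      rw [← ih]
      rfl

-- paired boundaries compute pvSpecFrom
theorem pairs_bnds (nums : List Int) :
    ∀ (l : List Int) (i : ℕ), nums.drop i = l → 1 ≤ i → i ≤ nums.length →
    ∀ (s c : Int), PySem.List.pyGetD nums ((i : Int) - 1) 0 = c → PySem.List.pyGetD nums s 0 = c →
    pvPairs nums (s :: ((PySem.List.pyRange (i : Int) (nums.length : Int) 1).filter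
        (fun j => PySem.List.pyGetD nums j 0 != PySem.List.pyGetD nums (j - 1) 0)) ++ [(nums.length : Int)])
      = pvSpecFrom s c (i : Int) l := by
  intro l
  induction l with
  | nil =>
    intro i hd h1 hle s c hc hs
    have hlen : nums.length ≤ i := List.drop_eq_nil_iff.mp hd
    have hi : i = nums.length := by omega
    rw [PySem.List.pyRange_one_eq_nil (by exact_mod_cast hi.ge)]
    simp [pvPairs, pvSpecFrom, hi, hs]
  | cons x t ih =>
    intro i hd h1 hle s c hc hs
    have hj : i < nums.length := by
      by_contra hcon
      rw [List.drop_eq_nil_iff.mpr (by omega)] at hd; exact absurd hd (by simp)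
    have hcc := (List.drop_eq_getElem_cons (l := nums) hj).symm.trans hd
    obtain ⟨hx, ht⟩ := List.cons_eq_cons.mp hcc
    have hget : PySem.List.pyGetD nums (i : Int) 0 = x := by rw [pyGetD_nat nums i hj, hx]
    rw [PySem.List.pyRange_one_cons (by exact_mod_cast hj), List.filter_cons]
    by_cases hv : x = c
    · rw [if_neg (by simp [hget, hc, hv])]
      have hrec := ih (i + 1) ht (by omega) (by omega) s c
        (by push_cast; rw [show (i:Int) + 1 - 1 = (i:Int) from by ring, hget, hv]) hs
      push_cast at hrec
      rw [hrec, pvSpecFrom, if_neg (by simp [hv])]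
    · rw [if_pos (by simp [hget, hc, hv])]
      have hrec := ih (i + 1) ht (by omega) (by omega) (i : Int) x
        (by push_cast; rw [show (i:Int) + 1 - 1 = (i:Int) from by ring, hget]) hget
      push_cast at hrec
      rw [List.cons_append] at hrec
      rw [List.cons_append, List.cons_append, pvPairs_cons_cons]
      rw [hrec, pvSpecFrom, if_pos (by simpa using hv), hs]

-- ===== VERDICT (by name: the statement is the Claim_ definition above) =====
theorem find_equal_runs_spec : Claim_equal_find_equal_runs := by
  intro nums _
  unfold Spec_find_equal_runs find_equal_runs find_equal_runs_alt
  cases nums with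
  | nil => simp
  | cons x t =>
    rw [if_neg (by simp), if_neg (by simp)]
    have h0 : PySem.List.pyGetD (x :: t) (0 : Int) 0 = x := by
      simpa using pyGetD_nat (x :: t) 0 (by simp)
    have hA := key_foldA (x :: t) t 1 (by simp) (by simp) [] 0 x
    have hB := pairs_bnds (x :: t) t 1 (by simp) le_rfl (by simp) 0 x (by simpa using h0) h0
    push_cast at hA hB
    rw [h0, hA, ← hB, zip_map_eq_pairs]
    simp
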